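-- pv_equiv track=rewrite | github.com/dsegovia90/staircase | test2.py | greedy_approach
-- ===== SOURCE A (Python) =====
-- def greedy_approach(lambs, n, prev_val, prev_prev_val):
-- 	if n == 0:
-- 		return greedy_approach(lambs - 1, n + 1, 1, 0)
-- 	elif n == 1:
-- 		return greedy_approach(lambs - 1, n + 1, 1, 1)
-- 	elif prev_prev_val + prev_val <= lambs:
-- 		return greedy_approach(lambs - prev_prev_val - prev_val, n + 1, prev_prev_val + prev_val, prev_val)
-- 	else:
-- 		return n
-- ===== SOURCE B (Python) =====
-- def greedy_approach(lambs, n, prev_val, prev_prev_val):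
--     # Record the greedy Fibonacci terms in a list, testing fit by prefix sums
--     # against the original total; the answer is n plus the number of recorded terms.
--     if n == 0:
--         lambs, n, prev_val, prev_prev_val = lambs - 2, 2, 1, 1
--     elif n == 1:
--         lambs, n, prev_val, prev_prev_val = lambs - 1, 2, 1, 1
--     terms = []
--     a, b = prev_prev_val, prev_val
--     while sum(terms) + a + b <= lambs:
--         terms.append(a + b)
--         a, b = b, a + b
--     return n + len(terms)
-- ===== Notes on version B (the rewrite author's own statement) =====
-- stated objective: alternative
-- what changed: A's recursion that mutates a remaining budget is replaced by seeding the n==0/n==1 bootstrap cases once and then building the list of greedy Fibonacci terms, testing fit by prefix sums against the original total and returning n plus the list length.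
-- outside the precondition, e.g. on greedy_approach(10, -1, 1, 0): A returns 4, B returns 2; on greedy_approach(5, 3, -1, 3): A returns 5, B returns 5
import Mathlib
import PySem

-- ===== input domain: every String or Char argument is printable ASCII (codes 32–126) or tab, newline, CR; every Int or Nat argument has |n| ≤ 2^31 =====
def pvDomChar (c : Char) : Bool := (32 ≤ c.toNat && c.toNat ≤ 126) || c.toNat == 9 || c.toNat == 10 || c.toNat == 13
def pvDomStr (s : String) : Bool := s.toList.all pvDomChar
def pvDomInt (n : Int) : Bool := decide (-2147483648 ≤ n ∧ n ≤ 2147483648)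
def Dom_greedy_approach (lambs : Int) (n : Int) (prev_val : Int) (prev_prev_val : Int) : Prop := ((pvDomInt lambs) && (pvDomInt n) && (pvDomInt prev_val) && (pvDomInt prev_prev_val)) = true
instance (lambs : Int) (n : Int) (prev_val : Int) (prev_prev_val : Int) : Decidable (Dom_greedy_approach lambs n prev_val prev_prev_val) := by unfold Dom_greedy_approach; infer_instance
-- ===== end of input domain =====

-- B replaces A's budget-mutating recursion by building the list of greedy Fibonacci terms (prefix sums against the original total) and returning n plus the list length (alternative decomposition, same cost class).


-- ===== PORT A =====
-- A's unbounded recursion is made total with a fuel counter (fuel 1000 never runs out on Pre_);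
-- each recursive call spends one fuel, the four branches are A's, in A's order.
def greedyA : Nat → Int → Int → Int → Int → Int
  | 0, _, n, _, _ => n
  | (f+1), lambs, n, prev_val, prev_prev_val =>
    if n = 0 then greedyA f (lambs - 1) (n + 1) 1 0
    else if n = 1 then greedyA f (lambs - 1) (n + 1) 1 1
    else if prev_prev_val + prev_val ≤ lambs then
      greedyA f (lambs - prev_prev_val - prev_val) (n + 1) (prev_prev_val + prev_val) prev_val
    else n

def greedy_approach (lambs : Int) (n : Int) (prev_val : Int) (prev_prev_val : Int) : Int :=
  greedyA 1000 lambs n prev_val prev_prev_val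

-- ===== PORT B =====
-- Source B's term-list builder: append a+b while sum(terms)+a+b ≤ lambs; fuel is the totality guard (never exhausted on Pre_).
def buildTerms : Nat → Int → List Int → Int → Int → List Int
  | 0, _, terms, _, _ => terms
  | (f+1), lambs, terms, a, b =>
    if terms.sum + a + b ≤ lambs then buildTerms f lambs (terms ++ [a + b]) b (a + b)
    else terms

def greedy_approach_alt (lambs : Int) (n : Int) (prev_val : Int) (prev_prev_val : Int) : Int :=
  if n = 0 then 2 + ((buildTerms 1000 (lambs - 2) [] 1 1).length : Int)
  else if n = 1 then 2 + ((buildTerms 1000 (lambs - 1) [] 1 1).length : Int)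
  else n + ((buildTerms 1000 lambs [] prev_prev_val prev_val).length : Int)

-- ===== PRECONDITION & SPEC =====
-- Pre_ excludes inputs on which the Python A's recursion either never terminates
-- (e.g. prev_val = prev_prev_val = 0 with 0 ≤ lambs) or, for n < 2 entering the loop
-- branch, re-enters the n==0/n==1 seeding branches mid-loop (an accident of A's
-- dispatch that resets the Fibonacci state); it also conservatively excludes n ≥ 2
-- loop states with negative seeds, on some of which A does return (both programs
-- then agree, Pre_ is narrower than its reason there).
def Pre_greedy_approach (lambs : Int) (n : Int) (prev_val : Int) (prev_prev_val : Int) : Prop :=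
  n = 0 ∨ n = 1 ∨ lambs < prev_val + prev_prev_val ∨
    (2 ≤ n ∧ 0 ≤ prev_val ∧ 1 ≤ prev_val + prev_prev_val)
instance (lambs : Int) (n : Int) (prev_val : Int) (prev_prev_val : Int) : Decidable (Pre_greedy_approach lambs n prev_val prev_prev_val) := by unfold Pre_greedy_approach; infer_instance

def pvWitness_greedy_approach : Int × Int × Int × Int := (10, 0, 0, 0)

def Spec_greedy_approach (lambs : Int) (n : Int) (prev_val : Int) (prev_prev_val : Int) (out : Int) : Prop := out = greedy_approach_alt lambs n prev_val prev_prev_val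
instance (lambs : Int) (n : Int) (prev_val : Int) (prev_prev_val : Int) (out : Int) : Decidable (Spec_greedy_approach lambs n prev_val prev_prev_val out) := by unfold Spec_greedy_approach; infer_instance

-- ===== CLAIM (what is proved, stated in full; the proofs are below) =====
def Claim_equal_greedy_approach : Prop := ∀ (lambs : Int) (n : Int) (prev_val : Int) (prev_prev_val : Int), Dom_greedy_approach lambs n prev_val prev_prev_val → Pre_greedy_approach lambs n prev_val prev_prev_val → Spec_greedy_approach lambs n prev_val prev_prev_val (greedy_approach lambs n prev_val prev_prev_val)

-- ===== LEMMAS AND PROOFS =====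

theorem greedyA_succ (f : Nat) (lambs n prev_val prev_prev_val : Int) :
    greedyA (f+1) lambs n prev_val prev_prev_val =
      (if n = 0 then greedyA f (lambs - 1) (n + 1) 1 0
       else if n = 1 then greedyA f (lambs - 1) (n + 1) 1 1
       else if prev_prev_val + prev_val ≤ lambs then
         greedyA f (lambs - prev_prev_val - prev_val) (n + 1) (prev_prev_val + prev_val) prev_val
       else n) := rfl

theorem buildTerms_succ (f : Nat) (lambs : Int) (terms : List Int) (a b : Int) :
    buildTerms (f+1) lambs terms a b =
      (if terms.sum + a + b ≤ lambs then buildTerms f lambs (terms ++ [a + b]) b (a + b)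
       else terms) := rfl

-- Once n ≥ 2, A's recursion counts exactly the terms B appends beyond the given prefix.
theorem greedyA_eq_build (f : Nat) : ∀ (L n a b : Int) (terms : List Int), 2 ≤ n →
    greedyA f (L - terms.sum) n b a =
      n + (((buildTerms f L terms a b).length : Int) - (terms.length : Int)) := by
  induction f with
  | zero => intro L n a b terms _; simp [greedyA, buildTerms]
  | succ f ih =>
    intro L n a b terms hn
    have h0 : n ≠ 0 := by omega
    have h1 : n ≠ 1 := by omega
    rw [greedyA_succ, buildTerms_succ]
    simp only [h0, h1, if_false]
    have hc : (a + b ≤ L - terms.sum) ↔ (terms.sum + a + b ≤ L) := by omega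
    split_ifs with h h' h'
    · have := ih L (n + 1) b (a + b) (terms ++ [a + b]) (by omega)
      have hs : (terms ++ [a + b]).sum = terms.sum + (a + b) := by simp
      have hL : L - terms.sum - a - b = L - (terms ++ [a + b]).sum := by rw [hs]; ring
      rw [hL, this]
      simp only [List.length_append, List.length_cons, List.length_nil]
      push_cast
      ring
    · exact absurd (hc.mp h) h'
    · exact absurd (hc.mpr h') h
    · simp

-- Fibonacci pairs: (fp f).1 is the shifted Fibonacci sequence 1,1,2,3,5,…
def fp : Nat → Int × Int
  | 0 => (1, 1)
  | (f+1) => match fp f with | (a, b) => (b, a + b)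

theorem fp_succ (f : Nat) : fp (f+1) = ((fp f).2, (fp f).1 + (fp f).2) := by
  simp only [fp]

theorem fp_pos (f : Nat) : 1 ≤ (fp f).1 ∧ (fp f).1 ≤ (fp f).2 := by
  induction f with
  | zero => exact ⟨le_refl 1, le_refl 1⟩
  | succ f ih => exact ⟨le_trans ih.1 ih.2, by have := ih.1; have := ih.2; rw [fp_succ]; dsimp only; omega⟩

-- Fuel-sufficiency: with 0 ≤ b, 1 ≤ a + b and the remaining budget below the
-- Fibonacci bound, extra fuel does not change the built list.
theorem buildTerms_fuel (f : Nat) : ∀ (k : Nat) (L : Int) (terms : List Int) (a b : Int),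
    0 ≤ b → 1 ≤ a + b → L - terms.sum < b * (fp (f+1)).1 + a * (fp f).1 →
    buildTerms (f + k) L terms a b = buildTerms f L terms a b := by
  induction f with
  | zero =>
    intro k L terms a b hb hs hL
    have hgt : ¬ (terms.sum + a + b ≤ L) := by simp [fp] at hL; omega
    cases k with
    | zero => rfl
    | succ k => simp [buildTerms, hgt]
  | succ f ih =>
    intro k L terms a b hb hs hL
    have hstep : (f + 1) + k = (f + k) + 1 := by omega
    rw [hstep]
    simp only [buildTerms]
    split_ifs with h
    · apply ih k L (terms ++ [a + b]) b (a + b) (by omega) (by omega)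
      have hsum : (terms ++ [a + b]).sum = terms.sum + (a + b) := by simp
      have hfp2 : (fp (f+2)).1 = (fp (f+1)).1 + (fp f).1 := by
        rw [fp_succ (f+1), fp_succ f]; dsimp only; ring
      have h1 : 1 ≤ (fp f).1 := (fp_pos f).1
      have h2 : 1 ≤ (fp (f+1)).1 := (fp_pos (f+1)).1
      rw [hfp2] at hL
      rw [hsum]
      nlinarith [mul_nonneg hb (le_of_lt (lt_of_lt_of_le zero_lt_one h1))]
    · rfl

-- The Fibonacci bound holds for any L ≤ 2^31 with the (1,1) seed.
set_option maxRecDepth 4000 in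
theorem bound_of_dom (L : Int) (hL : L ≤ 2147483648) :
    L < 1 * (fp 50).1 + 1 * (fp 49).1 := by
  have h : fp 49 = (12586269025, 20365011074) := by decide
  have h49 : (fp 49).1 = 12586269025 := by rw [h]
  have h50 : (fp 50).1 = 20365011074 := by rw [fp_succ, h]
  rw [h49, h50]; omega

theorem greedyA_seed0 (f : Nat) (L pv pp : Int) :
    greedyA (f+1+1) L 0 pv pp = greedyA f (L - 2) 2 1 1 := by
  rw [greedyA_succ]
  norm_num
  rw [greedyA_succ]
  norm_num [sub_sub]

theorem greedyA_seed1 (f : Nat) (L pv pp : Int) :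
    greedyA (f+1) L 1 pv pp = greedyA f (L - 1) 2 1 1 := by
  rw [greedyA_succ]
  norm_num

-- From the (1,1) seed with budget ≤ 2^31, A's count is 2 plus B's list length at any fuel ≥ 49.
theorem seeded_eq (f : Nat) (hf : 49 ≤ f) (L : Int) (hL : L ≤ 2147483648) :
    greedyA f L 2 1 1 = 2 + ((buildTerms 1000 L [] 1 1).length : Int) := by
  have hb := bound_of_dom L hL
  have e1 := buildTerms_fuel 49 (f - 49) L [] 1 1 (by omega) (by omega) (by simpa using hb)
  have e2 := buildTerms_fuel 49 951 L [] 1 1 (by omega) (by omega) (by simpa using hb)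
  have hA := greedyA_eq_build f L 2 1 1 [] (by omega)
  simp only [List.sum_nil, sub_zero, List.length_nil, Int.ofNat_zero] at hA
  rw [hA, show f = 49 + (f - 49) from by omega, e1, show (1000 : Nat) = 49 + 951 from rfl, e2]

theorem greedy_approach_spec : Claim_equal_greedy_approach := by
  unfold Claim_equal_greedy_approach
  intro L n pv pp hdom hpre
  have hdomL : L ≤ 2147483648 := by
    unfold Dom_greedy_approach pvDomInt at hdom
    simp only [Bool.and_eq_true, decide_eq_true_eq] at hdom
    exact hdom.1.1.1.2
  unfold Spec_greedy_approach greedy_approach greedy_approach_alt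
  by_cases h0 : n = 0
  · subst h0
    simp only [reduceIte]
    rw [show (1000 : Nat) = 998 + 1 + 1 from rfl, greedyA_seed0]
    exact seeded_eq 998 (by omega) (L - 2) (by omega)
  · by_cases h1 : n = 1
    · subst h1
      simp only [h0 ]
      norm_num
      rw [show (1000 : Nat) = 999 + 1 from rfl, greedyA_seed1]
      exact seeded_eq 999 (by omega) (L - 1) (by omega)
    · simp only [h0, h1, if_false]
      rcases hpre with h | h | h | h
      · exact absurd h h0
      · exact absurd h h1
      · -- immediate return: the guard fails at once on both sides
        have hgt : ¬ (pp + pv ≤ L) := by omega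
        have hgt' : ¬ (([] : List Int).sum + pp + pv ≤ L) := by simpa using hgt
        rw [show (1000 : Nat) = 999 + 1 from rfl, greedyA_succ, buildTerms_succ]
        simp [h0, h1, hgt]
      · -- n ≥ 2: A's recursion counts exactly B's appended terms
        have := greedyA_eq_build 1000 L n pp pv ([] : List Int) h.1
        simpa using this
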